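-- pv_equiv track=rewrite | github.com/allouchear/NNMol-IR | Utils/Aufbau.py | valence
-- ===== SOURCE A (Python) =====
-- prefix= ["1s", "2s", "2p", "3s", "3p", "4s", "4p", "3d", "4p", "5s", "4d", "5p", "6s",  "4f", "5d", "6p", "7s", "5f", "5d", "7p" ]
--
-- def maxOccl (s):
-- 	if(s[1]) == "s":
-- 		maxc=2
-- 		l=0
-- 	if(s[1]) == "p":
-- 		maxc=6
-- 		l=1
-- 	if(s[1]) == "d":
-- 		maxc=10
-- 		l=2
-- 	if(s[1]) == "f":
-- 		maxc=14
-- 		l=3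
-- 	return maxc, l
--
-- def valence (atomicNumber):
-- 	Z=atomicNumber
-- 	n=[]
-- 	occ=[]
-- 	l=[]
-- 	nmax=0
-- 	for x in range(len(prefix)):
-- 		maxc,lc=maxOccl(prefix[x])
-- 		nc= int(prefix[x][0])
-- 		if Z == 0:
-- 			break
-- 		elif Z >= maxc:
-- 			if nmax<nc:
-- 				nmax= nc
-- 				n = []
-- 				l = []
-- 				occ = []
-- 			n = n + [nc]
-- 			l = l + [lc]
-- 			occ = occ + [maxc]
-- 			Z -= maxc
-- 		elif Z < maxc:
-- 			if nmax<nc: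
-- 				nmax= nc
-- 				n = []
-- 				l = []
-- 				occ = []
-- 			n = n + [nc]
-- 			l = l + [lc]
-- 			occ = occ + [Z]
-- 			break;
-- 	return n,l,occ
-- ===== SOURCE B (Python) =====
-- prefix= ["1s", "2s", "2p", "3s", "3p", "4s", "4p", "3d", "4p", "5s", "4d", "5p", "6s",  "4f", "5d", "6p", "7s", "5f", "5d", "7p" ]
--
-- SHELL = {"s": (2, 0), "p": (6, 1), "d": (10, 2), "f": (14, 3)}
--
-- def valence(atomicNumber):
--     # Pass 1: build the full list of filled shells (nc, lc, occupation).
--     Z = atomicNumber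
--     shells = []
--     for s in prefix:
--         if Z == 0:
--             break
--         maxc, lc = SHELL[s[1]]
--         nc = int(s[0])
--         if Z >= maxc:
--             shells.append((nc, lc, maxc))
--             Z -= maxc
--         else:
--             shells.append((nc, lc, Z))
--             break
--     if not shells:
--         return [], [], []
--     # Pass 2: keep the tail starting at the first shell with the maximal n.
--     ns = [t[0] for t in shells]
--     i = ns.index(max(ns))
--     tail = shells[i:]
--     return [t[0] for t in tail], [t[1] for t in tail], [t[2] for t in tail]
-- ===== Notes on version B (the rewrite author's own statement) =====
-- stated objective: alternative
-- what changed: A interleaves filling with state resets (clearing n/l/occ whenever a new record-high principal quantum number appears); B builds the full list of filled shells in one pass and then slices off the tail starting at the first shell with the maximal n, using a dict for per-letter shell data instead of an if-chain.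
import Mathlib
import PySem

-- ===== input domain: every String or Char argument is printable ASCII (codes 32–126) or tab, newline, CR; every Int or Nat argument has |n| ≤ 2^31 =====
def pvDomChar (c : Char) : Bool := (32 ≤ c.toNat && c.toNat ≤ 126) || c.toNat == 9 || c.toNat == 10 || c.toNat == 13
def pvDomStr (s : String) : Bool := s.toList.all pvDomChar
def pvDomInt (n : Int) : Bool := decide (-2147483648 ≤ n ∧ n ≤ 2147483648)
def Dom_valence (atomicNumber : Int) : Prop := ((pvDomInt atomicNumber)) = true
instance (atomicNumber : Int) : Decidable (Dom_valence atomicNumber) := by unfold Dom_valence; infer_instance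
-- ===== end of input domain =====

-- B replaces A's in-loop "reset the lists at each new record-high n" with a build-then-slice
-- decomposition (build all filled shells, then keep the tail from the first shell of maximal n);
-- objective: simpler/alternative decomposition, same cost.

-- the module-level constant `prefix` shared by both Pythons
def prefixList : List String := ["1s", "2s", "2p", "3s", "3p", "4s", "4p", "3d", "4p", "5s", "4d", "5p", "6s", "4f", "5d", "6p", "7s", "5f", "5d", "7p"]

-- ===== PORT A =====
-- maxc/l start unassigned in Python (UnboundLocalError if no letter matches); the `.getD 0`
-- default is never reached on the strings this is called with (all prefix entries match).
def maxOccl (s : String) : Int × Int :=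
  let c := PySem.Str.pyGet? s 1
  let st : Option Int × Option Int := (none, none)
  let st := if c = some 's' then (some 2, some 0) else st
  let st := if c = some 'p' then (some 6, some 1) else st
  let st := if c = some 'd' then (some 10, some 2) else st
  let st := if c = some 'f' then (some 14, some 3) else st
  (st.1.getD 0, st.2.getD 0)

-- int(prefix[x][0]); the index and parse never fail on prefix entries, `.getD 0` unreached
def ncOf (s : String) : Int :=
  ((PySem.Str.pyGet? s 0).bind (fun c => PySem.Int.ofStr? (String.ofList [c]))).getD 0

-- the `for x in range(len(prefix))` loop of A, with break as early return
def valenceLoop : List Nat → Int → List Int → List Int → List Int → Int → List Int × List Int × List Int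
  | [], _, n, l, occ, _ => (n, l, occ)
  | x :: xs, Z, n, l, occ, nmax =>
    let s := (PySem.List.pyGet? prefixList (x : Int)).getD ""
    let maxc := (maxOccl s).1
    let lc := (maxOccl s).2
    let nc := ncOf s
    if Z = 0 then (n, l, occ)
    else if maxc ≤ Z then
      if nmax < nc then
        valenceLoop xs (Z - maxc) ([nc]) ([lc]) ([maxc]) nc
      else
        valenceLoop xs (Z - maxc) (n ++ [nc]) (l ++ [lc]) (occ ++ [maxc]) nmax
    else
      if nmax < nc then ([nc], [lc], [Z])
      else (n ++ [nc], l ++ [lc], occ ++ [Z])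

def valence (atomicNumber : Int) : List Int × List Int × List Int :=
  valenceLoop (List.range prefixList.length) atomicNumber [] [] [] 0

-- ===== PORT B =====
-- SHELL = {"s": (2,0), "p": (6,1), "d": (10,2), "f": (14,3)}
def shellDict : PySem.Dict Char (Int × Int) :=
  PySem.Dict.ofList [('s', (2, 0)), ('p', (6, 1)), ('d', (10, 2)), ('f', (14, 3))]

-- pass 1 of B: the full list of filled shells (nc, lc, occupation)
-- (SHELL[s[1]] and int(s[0]) never fail on prefix entries; the defaults are unreached)
def buildShells : List String → Int → List (Int × Int × Int)
  | [], _ => []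
  | s :: rest, Z =>
    if Z = 0 then []
    else
      let mcl := (shellDict.getD ((PySem.Str.pyGet? s 1).getD ' ') (0, 0))
      let nc := ncOf s
      if mcl.1 ≤ Z then (nc, mcl.2, mcl.1) :: buildShells rest (Z - mcl.1)
      else [(nc, mcl.2, Z)]

def valence_alt (atomicNumber : Int) : List Int × List Int × List Int :=
  let shells := buildShells prefixList atomicNumber
  if shells = [] then ([], [], [])
  else
    let ns := shells.map (·.1)
    let i := (PySem.List.index? ns ((PySem.List.max? ns (fun v => v)).getD 0)).getD 0
    let tail := PySem.List.slice shells (some (i : Int)) none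
    (tail.map (·.1), tail.map (·.2.1), tail.map (·.2.2))

-- ===== PRECONDITION & SPEC =====
def Spec_valence (atomicNumber : Int) (out : List Int × List Int × List Int) : Prop := out = valence_alt atomicNumber
instance (atomicNumber : Int) (out : List Int × List Int × List Int) : Decidable (Spec_valence atomicNumber out) := by unfold Spec_valence; infer_instance

-- ===== CLAIM (what is proved, stated in full; the proofs are below) =====
def Claim_equal_valence : Prop := ∀ (atomicNumber : Int), Dom_valence atomicNumber → Spec_valence atomicNumber (valence atomicNumber)

-- ===== LEMMAS AND PROOFS =====

-- capacity of a run of A's loop over index list xs (proof-only helper)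
def capA (xs : List Nat) : Int :=
  (xs.map (fun (x : Nat) => (maxOccl ((PySem.List.pyGet? prefixList (x : Int)).getD "")).1)).sum

-- capacity of a run of B's pass 1 over shell-name list ss (proof-only helper)
def capB (ss : List String) : Int :=
  (ss.map (fun s => (shellDict.getD ((PySem.Str.pyGet? s 1).getD ' ') ((0:Int), (0:Int))).1)).sum

-- if both Z's dominate the total capacity of the remaining shells, A's loop takes the
-- full-fill branch throughout and its result does not depend on Z
theorem loopA_congr : ∀ (xs : List Nat) (Z1 Z2 : Int) (n l occ : List Int) (nmax : Int),
    (∀ x ∈ xs, 0 < (maxOccl ((PySem.List.pyGet? prefixList (x : Int)).getD "")).1) →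
    capA xs ≤ Z1 → capA xs ≤ Z2 →
    valenceLoop xs Z1 n l occ nmax = valenceLoop xs Z2 n l occ nmax := by
  intro xs
  induction xs with
  | nil => intros; rfl
  | cons x xs ih =>
    intro Z1 Z2 n l occ nmax hpos h1 h2
    have hx := hpos x (by simp)
    have hrest : 0 ≤ capA xs := by
      unfold capA
      apply List.sum_nonneg
      intro a ha
      have ha' := List.mem_map.mp ha
      obtain ⟨y, hy, rfl⟩ := ha'
      exact le_of_lt (hpos y (List.mem_cons_of_mem _ hy))
    have hcap : capA (x :: xs) =
        (maxOccl ((PySem.List.pyGet? prefixList (x : Int)).getD "")).1 + capA xs := by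
      simp [capA]
    rw [hcap] at h1 h2
    have hm1 : ¬ Z1 = 0 := by omega
    have hm2 : ¬ Z2 = 0 := by omega
    have hp1 : (maxOccl ((PySem.List.pyGet? prefixList (x : Int)).getD "")).1 ≤ Z1 := by omega
    have hp2 : (maxOccl ((PySem.List.pyGet? prefixList (x : Int)).getD "")).1 ≤ Z2 := by omega
    simp only [valenceLoop]
    rw [if_neg hm1, if_neg hm2, if_pos hp1, if_pos hp2]
    split_ifs <;>
      · refine ih _ _ _ _ _ _ (fun y hy => hpos y (List.mem_cons_of_mem _ hy)) ?_ ?_ <;> omega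

-- same for B's pass 1
theorem buildB_congr : ∀ (ss : List String) (Z1 Z2 : Int),
    (∀ s ∈ ss, 0 < (shellDict.getD ((PySem.Str.pyGet? s 1).getD ' ') ((0:Int), (0:Int))).1) →
    capB ss ≤ Z1 → capB ss ≤ Z2 →
    buildShells ss Z1 = buildShells ss Z2 := by
  intro ss
  induction ss with
  | nil => intros; rfl
  | cons s ss ih =>
    intro Z1 Z2 hpos h1 h2
    have hx := hpos s (by simp)
    have hrest : 0 ≤ capB ss := by
      unfold capB
      apply List.sum_nonneg
      intro a ha
      have ha' := List.mem_map.mp ha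
      obtain ⟨y, hy, rfl⟩ := ha'
      exact le_of_lt (hpos y (List.mem_cons_of_mem _ hy))
    have hcap : capB (s :: ss) =
        (shellDict.getD ((PySem.Str.pyGet? s 1).getD ' ') ((0:Int), (0:Int))).1 + capB ss := by
      simp [capB]
    rw [hcap] at h1 h2
    have hm1 : ¬ Z1 = 0 := by omega
    have hm2 : ¬ Z2 = 0 := by omega
    have hp1 : (shellDict.getD ((PySem.Str.pyGet? s 1).getD ' ') ((0:Int), (0:Int))).1 ≤ Z1 := by omega
    have hp2 : (shellDict.getD ((PySem.Str.pyGet? s 1).getD ' ') ((0:Int), (0:Int))).1 ≤ Z2 := by omega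
    simp only [buildShells]
    rw [if_neg hm1, if_neg hm2, if_pos hp1, if_pos hp2]
    congr 1
    refine ih _ _ (fun y hy => hpos y (List.mem_cons_of_mem _ hy)) ?_ ?_ <;> omega

theorem valence_neg (Z : Int) (h : Z < 0) : valence Z = ([1], [0], [Z]) := by
  have h0 : Z ≠ 0 := by omega
  have h2 : ¬((2:Int) ≤ Z) := by omega
  have e1 : maxOccl "1s" = (2, 0) := by decide
  have e2 : ncOf "1s" = 1 := by decide
  simp only [valence]
  rw [show List.range prefixList.length = 0 :: List.range' 1 19 from by decide]
  rw [valenceLoop]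
  simp [prefixList, h0, h2, e1, e2, PySem.List.pyGet?, PySem.List.pyIdx?]

theorem valence_alt_neg (Z : Int) (h : Z < 0) : valence_alt Z = ([1], [0], [Z]) := by
  have h0 : Z ≠ 0 := by omega
  have h2 : ¬((2:Int) ≤ Z) := by omega
  have e2 : ncOf "1s" = 1 := by decide
  have g1 : (shellDict.getD ((PySem.Str.pyGet? "1s" 1).getD ' ') ((0:Int), (0:Int))) = (2, 0) := by
    decide
  simp only [valence_alt, prefixList]
  rw [buildShells, if_neg h0]
  simp only [g1, e2]
  rw [if_neg h2]
  simp [PySem.List.max?, PySem.List.index?]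

theorem valence_big (Z : Int) (h : 124 ≤ Z) : valence Z = valence 124 := by
  have hcap : capA (List.range prefixList.length) = 124 := by decide
  exact loopA_congr _ _ _ _ _ _ _ (by decide) (by omega) (by omega)

theorem valence_alt_big (Z : Int) (h : 124 ≤ Z) : valence_alt Z = valence_alt 124 := by
  have hcap : capB prefixList = 124 := by decide
  have hb : buildShells prefixList Z = buildShells prefixList 124 :=
    buildB_congr _ _ _ (by decide) (by omega) (by omega)
  simp only [valence_alt, hb]

-- ===== VERDICT (by name: the statement is the Claim_ definition above) =====
theorem valence_spec : Claim_equal_valence := by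
  intro Z _
  unfold Spec_valence
  rcases lt_trichotomy Z 0 with hneg | rfl | hpos
  · rw [valence_neg Z hneg, valence_alt_neg Z hneg]
  · decide
  · by_cases hbig : 124 ≤ Z
    · rw [valence_big Z hbig, valence_alt_big Z hbig]
      decide
    · have h1 : 1 ≤ Z := hpos
      have h2 : Z ≤ 123 := by omega
      interval_cases Z <;> decide
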